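-- pv_equiv track=rewrite | github.com/awrreny/deterministic-password-manager | python-cli-prototype/auth/galois_field.py | euclid_division
-- ===== SOURCE A (Python) =====
-- def mul_no_mod(a, b):
--     # polynomial multiplication without a modulus
--     # same code as GF2n.mul(), with modulus removed
--     r = 0
--     while a != 0:
--         if a & 1:
--             r ^= b
--         a >>= 1
--         b <<= 1
--     return r
--
-- def euclid_division(a, b):
--     # for binary polynomials a, b, finds (q, r) s.t a = b*q + r where degree(r) < degree(b)
--     # loop invariant is a = b*q + r
--     if b == 0:
--         raise ZeroDivisionError()
--
--     r = a
--     q = 0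
--     while True:
--         # bit length is degree + 1 (if not 0)
--         d = r.bit_length()-b.bit_length()
--         if d < 0 or r == 0: break
--         r ^= (b << d)
--         q ^= (1 << d)
--
--     assert a == mul_no_mod(b,q) ^ r
--
--     return (q, r)
-- ===== SOURCE B (Python) =====
-- def euclid_division(a, b):
--     # synthetic (CRC-style) division: stream a's bits MSB-first into a bounded
--     # remainder register, reducing by an unshifted b whenever the register fills,
--     # and appending one quotient bit per streamed bit
--     if b == 0:
--         raise ZeroDivisionError()
--     db = b.bit_length()
--     q = 0
--     r = 0
--     for i in reversed(range(a.bit_length())):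
--         r = (r << 1) | ((a >> i) & 1)
--         if r.bit_length() == db:
--             r ^= b
--             q = (q << 1) | 1
--         else:
--             q = q << 1
--     return (q, r)
-- ===== Notes on version B (the rewrite author's own statement) =====
-- stated objective: alternative
-- what changed: Replaces A's whole-number long division (recompute deg r each round and xor the divisor shifted up to the remainder's top bit off a full-width remainder) by CRC-style synthetic division: a's bits are streamed MSB-first one at a time into a bounded remainder register (always below deg b) that is reduced by the unshifted divisor when it fills, appending one quotient bit per streamed bit.
-- outside the precondition, e.g. on euclid_division(-3, 2): A returns (1, -1), B returns (0, 1); on euclid_division(5, -1): A does not finish within the time limit, B returns (4, -7); on euclid_division(-1, 1): A does not finish within the time limit, B returns (1, 0)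
import Mathlib
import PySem

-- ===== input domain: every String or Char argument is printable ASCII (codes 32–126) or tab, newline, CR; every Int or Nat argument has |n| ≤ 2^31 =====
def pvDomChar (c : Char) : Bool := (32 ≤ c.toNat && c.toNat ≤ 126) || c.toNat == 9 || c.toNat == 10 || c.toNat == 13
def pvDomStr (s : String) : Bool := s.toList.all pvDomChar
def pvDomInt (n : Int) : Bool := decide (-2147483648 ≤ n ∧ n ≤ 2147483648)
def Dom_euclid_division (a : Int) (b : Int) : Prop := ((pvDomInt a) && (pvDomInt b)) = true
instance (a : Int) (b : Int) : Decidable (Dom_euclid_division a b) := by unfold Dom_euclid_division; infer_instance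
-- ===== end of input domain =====

-- B replaces A's whole-number long division (repeatedly xoring a shifted divisor off a
-- full-width remainder) by CRC-style synthetic division: a's bits are streamed MSB-first
-- into a bounded remainder register reduced by the unshifted divisor (alternative decomposition).


-- ===== PORT A =====
-- A's while-loop: state (r, q); d = r.bit_length() - b.bit_length(); stop when d < 0 or r = 0,
-- else r ^= b << d, q ^= 1 << d.  On Pre_ (0 ≤ a, 0 < b) all values are nonnegative, so the
-- loop runs over Nat (Nat.size = Python bit_length there); Nat.size r strictly decreases each
-- iteration, so fuel Nat.size a + 1 never runs out on Pre_ (the proof below never uses the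
-- fuel-exhausted branch).  When the else branch is taken d ≥ 0, so d.toNat is exact.
def pvLoopA (m : Nat) : Nat → Nat → Nat → Nat × Nat
  | 0, r, q => (q, r)
  | fuel+1, r, q =>
    if ((Nat.size r : Int) - (Nat.size m : Int)) < 0 ∨ r = 0 then (q, r)
    else pvLoopA m fuel (r ^^^ (m <<< ((Nat.size r : Int) - (Nat.size m : Int)).toNat))
           (q ^^^ (1 <<< ((Nat.size r : Int) - (Nat.size m : Int)).toNat))

def euclid_division (a : Int) (b : Int) : Int × Int :=
  if b = 0 then (0, a)  -- Python raises ZeroDivisionError here; excluded by Pre_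
  else
    let p := pvLoopA b.toNat (Nat.size a.toNat + 1) a.toNat 0
    ((p.1 : Int), (p.2 : Int))

-- ===== PORT B =====
-- Source B's loop body at index i: shift a's bit i into the register r; if the register's
-- bit length reaches db, xor off b and append quotient bit 1, else append quotient bit 0.
def pvStepB (m db a : Nat) (qr : Nat × Nat) (i : Nat) : Nat × Nat :=
  let r := (qr.2 <<< 1) ||| ((a >>> i) &&& 1)
  if Nat.size r = db then ((qr.1 <<< 1) ||| 1, r ^^^ m)
  else (qr.1 <<< 1, r)

-- reversed(range(a.bit_length())) = (List.range (Nat.size a)).reverse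
def euclid_division_alt (a : Int) (b : Int) : Int × Int :=
  if b = 0 then (0, a)  -- Source B raises ZeroDivisionError here; excluded by Pre_
  else
    let m := b.toNat
    let db := Nat.size m
    let p := ((List.range (Nat.size a.toNat)).reverse).foldl (pvStepB m db a.toNat) (0, 0)
    ((p.1 : Int), (p.2 : Int))

-- ===== PRECONDITION & SPEC =====
-- Pre_ restricts to the function's natural domain, encodings of GF(2) polynomials
-- (nonnegative ints) with a nonzero divisor: on b = 0 A raises ZeroDivisionError, and on
-- negative inputs A's two's-complement behaviour is accidental — A does not terminate at all
-- on some of them (e.g. (-1, 1) or (5, -1)) and returns meaningless negative "remainders"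
-- on others (see the cited example (-3, 2)); on many remaining negative inputs A happens to
-- terminate (sometimes even agreeing with B), but the set of negative inputs on which it
-- terminates has no closed form, so Pre_ excludes all of them.
def Pre_euclid_division (a : Int) (b : Int) : Prop := 0 ≤ a ∧ 0 < b
instance (a : Int) (b : Int) : Decidable (Pre_euclid_division a b) := by unfold Pre_euclid_division; infer_instance
def pvWitness_euclid_division : Int × Int := (13, 3)

def Spec_euclid_division (a : Int) (b : Int) (out : Int × Int) : Prop := out = euclid_division_alt a b
instance (a : Int) (b : Int) (out : Int × Int) : Decidable (Spec_euclid_division a b out) := by unfold Spec_euclid_division; infer_instance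

-- ===== CLAIM (what is proved, stated in full; the proofs are below) =====
def Claim_equal_euclid_division : Prop := ∀ (a : Int) (b : Int), Dom_euclid_division a b → Pre_euclid_division a b → Spec_euclid_division a b (euclid_division a b)

-- ===== LEMMAS AND PROOFS =====

-- carry-less (GF(2)[x]) product, Horner-style on the second argument; proof-only helper
def pvClmul (m : Nat) : Nat → Nat
  | q =>
    if h : q = 0 then 0
    else (pvClmul m (q / 2)) <<< 1 ^^^ (if q % 2 = 1 then m else 0)
  decreasing_by exact Nat.div_lt_self (Nat.pos_of_ne_zero h) one_lt_two

theorem pvClmul_zero (m : Nat) : pvClmul m 0 = 0 := by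
  rw [pvClmul]; simp

theorem pvClmul_ne (m : Nat) {q : Nat} (h : q ≠ 0) :
    pvClmul m q = (pvClmul m (q / 2)) <<< 1 ^^^ (if q % 2 = 1 then m else 0) := by
  conv_lhs => rw [pvClmul]
  simp [h]

theorem pv_xor_div_two (x y : Nat) : (x ^^^ y) / 2 = x / 2 ^^^ y / 2 := by
  have h : ∀ n : Nat, n / 2 = n >>> 1 := by
    intro n; simp [Nat.shiftRight_succ, Nat.shiftRight_zero]
  rw [h, h, h, Nat.shiftRight_xor_distrib]

theorem pv_xor_mod_two (x y : Nat) : (x ^^^ y) % 2 = (x % 2 + y % 2) % 2 := by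
  rw [Nat.xor_mod_two_eq, Nat.add_mod]

theorem pvClmul_xor (m : Nat) : ∀ x y : Nat, pvClmul m (x ^^^ y) = pvClmul m x ^^^ pvClmul m y := by
  intro x
  induction x using Nat.strong_induction_on with
  | _ x ih =>
    intro y
    by_cases hx : x = 0
    · simp [hx, pvClmul_zero]
    by_cases hy : y = 0
    · simp [hy, pvClmul_zero]
    by_cases hz : x ^^^ y = 0
    · have hxy : x = y := Nat.xor_eq_zero_iff.mp hz
      simp [hz, pvClmul_zero, hxy]
    rw [pvClmul_ne m hz, pvClmul_ne m hx, pvClmul_ne m hy]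
    rw [pv_xor_div_two, ih (x / 2) (Nat.div_lt_self (Nat.pos_of_ne_zero hx) one_lt_two)]
    rw [Nat.shiftLeft_xor_distrib]
    have hmod := pv_xor_mod_two x y
    rcases Nat.mod_two_eq_zero_or_one x with hx2 | hx2 <;>
      rcases Nat.mod_two_eq_zero_or_one y with hy2 | hy2 <;>
      simp [hx2, hy2] at hmod <;>
      simp [hx2, hy2, hmod, Nat.xor_assoc, Nat.xor_comm, Nat.xor_left_comm]

theorem pvClmul_one (m : Nat) : pvClmul m 1 = m := by
  rw [pvClmul_ne m one_ne_zero]; simp [pvClmul_zero]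

theorem pvClmul_shift (m q : Nat) : pvClmul m (q <<< 1) = (pvClmul m q) <<< 1 := by
  by_cases hq : q = 0
  · simp [hq, pvClmul_zero]
  · have h2 : q <<< 1 = 2 * q := by simp [Nat.shiftLeft_eq, Nat.mul_comm]
    have hne : q <<< 1 ≠ 0 := by rw [h2]; positivity
    rw [pvClmul_ne m hne, h2]
    simp [Nat.mul_div_cancel_left, Nat.mul_mod_right]

theorem pvClmul_pow (m : Nat) : ∀ d : Nat, pvClmul m (1 <<< d) = m <<< d := by
  intro d
  induction d with
  | zero => simpa using pvClmul_one m
  | succ d ih =>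
    have h : (1 : Nat) <<< (d+1) = (1 <<< d) <<< 1 := (Nat.shiftLeft_add 1 d 1).symm ▸ rfl
    rw [show d + 1 = d + 1 from rfl, Nat.shiftLeft_add, pvClmul_shift, ih, ← Nat.shiftLeft_add]

-- the top bit of a positive number is set
theorem pv_sizeMsb {m : Nat} (hm : 0 < m) : m.testBit (Nat.size m - 1) = true := by
  have hs : 0 < Nat.size m := Nat.size_pos.mpr hm
  have h1 : 2 ^ (Nat.size m - 1) ≤ m := Nat.lt_size.mp (by omega)
  have h2 : m < 2 ^ (Nat.size m - 1 + 1) := Nat.size_le.mp (by omega)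
  exact Nat.testBit_of_two_pow_le_and_two_pow_add_one_gt h1 h2

-- from r < 2^(k+1) with bit k clear, conclude r < 2^k
theorem pv_lt_of_testBit_false {r k : Nat} (hr : r < 2 ^ (k + 1))
    (hb : r.testBit k = false) : r < 2 ^ k := by
  by_contra hcon
  have := Nat.testBit_of_two_pow_le_and_two_pow_add_one_gt (Nat.le_of_not_lt hcon) hr
  rw [hb] at this
  exact Bool.false_ne_true this

-- x has its top bit above every bit of c, so xoring c keeps x ≥ 2^L
theorem pv_xor_ge {x c L : Nat} (hx : 2 ^ L ≤ x) (hc : c < 2 ^ L) : 2 ^ L ≤ x ^^^ c := by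
  have hxpos : 0 < x := lt_of_lt_of_le (Nat.two_pow_pos L) hx
  have hLt : L ≤ Nat.size x - 1 := by
    have := Nat.lt_size.mpr hx
    omega
  have hbx : x.testBit (Nat.size x - 1) = true := pv_sizeMsb hxpos
  have hbc : c.testBit (Nat.size x - 1) = false := by
    apply Nat.testBit_lt_two_pow
    exact lt_of_lt_of_le hc (Nat.pow_le_pow_right (by norm_num) hLt)
  have hbit : (x ^^^ c).testBit (Nat.size x - 1) = true := by
    simp [Nat.testBit_xor, hbx, hbc]
  calc 2 ^ L ≤ 2 ^ (Nat.size x - 1) := Nat.pow_le_pow_right (by norm_num) hLt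
  _ ≤ x ^^^ c := Nat.ge_two_pow_of_testBit hbit

-- size (q/2) + 1 = size q for q ≠ 0
theorem pv_size_div_two {q : Nat} (hq : q ≠ 0) : Nat.size (q / 2) + 1 = Nat.size q := by
  have hbit : Nat.bit (decide (q % 2 = 1)) (q / 2) = q := by
    rw [Nat.bit_val]
    rcases Nat.mod_two_eq_zero_or_one q with h | h <;> simp [h] <;> omega
  have := Nat.size_bit (b := decide (q % 2 = 1)) (n := q / 2) (by rw [hbit]; exact hq)
  rw [hbit] at this
  omega

-- bounds on the carry-less product: for m, q > 0, 2^(sm-1+sq-1) ≤ clmul m q < 2^(sm+sq-1)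
theorem pvClmul_bounds (m : Nat) (hm : 0 < m) :
    ∀ q : Nat, 0 < q →
      2 ^ (Nat.size m - 1 + (Nat.size q - 1)) ≤ pvClmul m q ∧
      pvClmul m q < 2 ^ (Nat.size m + Nat.size q - 1) := by
  intro q
  induction q using Nat.strong_induction_on with
  | _ q ih =>
    intro hq
    have hsm : 0 < Nat.size m := Nat.size_pos.mpr hm
    by_cases h1 : q = 1
    · subst h1
      rw [pvClmul_one]
      constructor
      · simpa using Nat.lt_size.mp (by omega)
      · simpa using Nat.lt_size_self m
    · have hq2 : 2 ≤ q := by omega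
      have hq2pos : 0 < q / 2 := Nat.div_pos hq2 (by norm_num)
      have hsz : Nat.size (q / 2) + 1 = Nat.size q := pv_size_div_two (by omega)
      have hs' : 0 < Nat.size (q / 2) := Nat.size_pos.mpr hq2pos
      obtain ⟨hlo, hhi⟩ := ih (q / 2) (Nat.div_lt_self (by omega) one_lt_two) hq2pos
      rw [pvClmul_ne m (by omega : q ≠ 0)]
      set c := pvClmul m (q / 2) with hc
      set s' := Nat.size (q / 2) with hs'def
      have hcs : c <<< 1 = 2 * c := by simp [Nat.shiftLeft_eq, Nat.mul_comm]
      have hshlo : 2 ^ (Nat.size m - 1 + s') ≤ c <<< 1 := by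
        rw [hcs]
        calc 2 ^ (Nat.size m - 1 + s') = 2 * 2 ^ (Nat.size m - 1 + (s' - 1)) := by
              rw [← pow_succ']
              congr 1
              omega
        _ ≤ 2 * c := by omega
      have hshhi : c <<< 1 < 2 ^ (Nat.size m + s') := by
        rw [hcs]
        calc 2 * c < 2 * 2 ^ (Nat.size m + s' - 1) := by omega
        _ = 2 ^ (Nat.size m + s') := by
              rw [← pow_succ']
              congr 1
              omega
      have ht : (if q % 2 = 1 then m else 0) < 2 ^ (Nat.size m - 1 + s') := by
        have hmlt : m < 2 ^ Nat.size m := Nat.lt_size_self m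
        have : (2:Nat) ^ Nat.size m ≤ 2 ^ (Nat.size m - 1 + s') :=
          Nat.pow_le_pow_right (by norm_num) (by omega)
        split <;> omega
      constructor
      · have : 2 ^ (Nat.size m - 1 + s') ≤ c <<< 1 ^^^ (if q % 2 = 1 then m else 0) :=
          pv_xor_ge hshlo ht
        calc 2 ^ (Nat.size m - 1 + (Nat.size q - 1)) = 2 ^ (Nat.size m - 1 + s') := by
              congr 1; omega
        _ ≤ _ := this
      · have ht' : (if q % 2 = 1 then m else 0) < 2 ^ (Nat.size m + s') := by
          have := ht
          have hmono : (2:Nat) ^ (Nat.size m - 1 + s') ≤ 2 ^ (Nat.size m + s') :=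
            Nat.pow_le_pow_right (by norm_num) (by omega)
          omega
        have := Nat.xor_lt_two_pow hshhi ht'
        calc c <<< 1 ^^^ (if q % 2 = 1 then m else 0) < 2 ^ (Nat.size m + s') := this
        _ = 2 ^ (Nat.size m + Nat.size q - 1) := by congr 1; omega

-- uniqueness of GF(2) quotient/remainder below degree of m
theorem pv_unique {m q1 r1 q2 r2 : Nat} (hm : 0 < m)
    (h1 : r1 < 2 ^ (Nat.size m - 1)) (h2 : r2 < 2 ^ (Nat.size m - 1))
    (h : pvClmul m q1 ^^^ r1 = pvClmul m q2 ^^^ r2) : q1 = q2 ∧ r1 = r2 := by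
  have hkey : pvClmul m (q1 ^^^ q2) = r1 ^^^ r2 := by
    rw [pvClmul_xor]
    have := congrArg (fun z => z ^^^ (pvClmul m q2 ^^^ r1)) h
    simpa [Nat.xor_assoc, Nat.xor_comm, Nat.xor_left_comm] using this
  have hq : q1 = q2 := by
    by_contra hne
    have hqz : q1 ^^^ q2 ≠ 0 := fun hz => hne (Nat.xor_eq_zero_iff.mp hz)
    have hlo := (pvClmul_bounds m hm (q1 ^^^ q2) (Nat.pos_of_ne_zero hqz)).1
    have hrx : r1 ^^^ r2 < 2 ^ (Nat.size m - 1) := Nat.xor_lt_two_pow h1 h2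
    have : (2:Nat) ^ (Nat.size m - 1) ≤ 2 ^ (Nat.size m - 1 + (Nat.size (q1 ^^^ q2) - 1)) :=
      Nat.pow_le_pow_right (by norm_num) (by omega)
    omega
  subst hq
  refine ⟨rfl, ?_⟩
  have : r1 ^^^ r2 = 0 := by
    have := hkey
    simpa [pvClmul_zero] using this.symm
  exact Nat.xor_eq_zero_iff.mp this

-- A's loop: invariant pvClmul m q ^^^ r, exit with r < 2^(size m - 1)
theorem pvLoopA_inv (m : Nat) (hm : 0 < m) :
    ∀ fuel r q, Nat.size r < fuel →
      pvClmul m (pvLoopA m fuel r q).1 ^^^ (pvLoopA m fuel r q).2 = pvClmul m q ^^^ r ∧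
      (pvLoopA m fuel r q).2 < 2 ^ (Nat.size m - 1) := by
  intro fuel
  induction fuel with
  | zero => intro r q h; omega
  | succ fuel ih =>
    intro r q hfuel
    have hsm : 0 < Nat.size m := Nat.size_pos.mpr hm
    rw [pvLoopA]
    by_cases hstop : ((Nat.size r : Int) - (Nat.size m : Int)) < 0 ∨ r = 0
    · rw [if_pos hstop]
      refine ⟨rfl, ?_⟩
      rcases hstop with hlt | hz
      · have hsz : Nat.size r < Nat.size m := by omega
        calc r < 2 ^ Nat.size r := Nat.lt_size_self r
        _ ≤ 2 ^ (Nat.size m - 1) := Nat.pow_le_pow_right (by norm_num) (by omega)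
      · subst hz; positivity
    · rw [if_neg hstop]
      push_neg at hstop
      obtain ⟨hge, hrne⟩ := hstop
      have hrpos : 0 < r := Nat.pos_of_ne_zero hrne
      have hsr : 0 < Nat.size r := Nat.size_pos.mpr hrpos
      have hmge : Nat.size m ≤ Nat.size r := by omega
      have htd : ((Nat.size r : Int) - (Nat.size m : Int)).toNat = Nat.size r - Nat.size m := by
        omega
      rw [htd]
      set d := Nat.size r - Nat.size m with hd
      set r' := r ^^^ (m <<< d) with hr'
      -- the step clears the top bit of r
      have hszShift : Nat.size (m <<< d) = Nat.size r := by
        rw [Nat.size_shiftLeft (by omega) d]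
        omega
      have hbr : r.testBit (Nat.size r - 1) = true := pv_sizeMsb hrpos
      have hbs : (m <<< d).testBit (Nat.size r - 1) = true := by
        rw [Nat.testBit_shiftLeft]
        have hdle : d ≤ Nat.size r - 1 := by omega
        have : Nat.size r - 1 - d = Nat.size m - 1 := by omega
        simp [this, pv_sizeMsb hm, hdle, ge_iff_le]
      have hbr' : r'.testBit (Nat.size r - 1) = false := by
        rw [hr', Nat.testBit_xor, hbr, hbs]
        rfl
      have hr'lt2 : r' < 2 ^ Nat.size r := by
        apply Nat.xor_lt_two_pow (Nat.lt_size_self r)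
        calc m <<< d < 2 ^ Nat.size (m <<< d) := Nat.lt_size_self _
        _ = 2 ^ Nat.size r := by rw [hszShift]
      have hr'lt : r' < 2 ^ (Nat.size r - 1) := by
        apply pv_lt_of_testBit_false _ hbr'
        calc r' < 2 ^ Nat.size r := hr'lt2
        _ ≤ 2 ^ (Nat.size r - 1 + 1) := Nat.pow_le_pow_right (by norm_num) (by omega)
      have hszr' : Nat.size r' < fuel := by
        have := Nat.size_le.mpr hr'lt
        omega
      obtain ⟨hinv, hbound⟩ := ih r' (q ^^^ (1 <<< d)) hszr'
      refine ⟨?_, hbound⟩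
      rw [hinv, pvClmul_xor, pvClmul_pow, hr']
      simp [Nat.xor_assoc, Nat.xor_comm, Nat.xor_left_comm]

-- arithmetic of shifting one bit in: (y <<< 1) ||| t = (y <<< 1) ^^^ t = 2y + t for t < 2
theorem pv_or_bit (y t : Nat) (ht : t < 2) : (y <<< 1) ||| t = 2 * y + t := by
  rw [← Nat.shiftLeft_add_eq_or_of_lt (by simpa using ht)]
  simp [Nat.shiftLeft_eq]
  omega

theorem pv_xor_bit (y t : Nat) (ht : t < 2) : (y <<< 1) ^^^ t = 2 * y + t := by
  apply Nat.eq_of_testBit_eq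
  intro i
  have h2 : 2 * y + t = (y <<< 1) ||| t := by rw [pv_or_bit y t ht]
  rw [h2]
  cases i with
  | zero =>
    have he : (y <<< 1) = 2 * y := by rw [Nat.shiftLeft_eq]; ring
    simp [Nat.testBit_xor, Nat.testBit_or, he]
  | succ i =>
    have hb : t.testBit (i + 1) = false :=
      Nat.testBit_lt_two_pow (lt_of_lt_of_le ht (by
        have : (2:Nat) = 2 ^ 1 := rfl
        rw [this]
        exact Nat.pow_le_pow_right (by norm_num) (by omega)))
    simp [Nat.testBit_xor, Nat.testBit_or, hb]

-- B's fold: processing (range k).reverse from a reduced state representing a >>> k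
theorem pvFoldB_inv (m a : Nat) (hm : 0 < m) :
    ∀ k q r, pvClmul m q ^^^ r = a >>> k → r < 2 ^ (Nat.size m - 1) →
      pvClmul m (((List.range k).reverse.foldl (pvStepB m (Nat.size m) a) (q, r)).1) ^^^
        ((List.range k).reverse.foldl (pvStepB m (Nat.size m) a) (q, r)).2 = a ∧
      ((List.range k).reverse.foldl (pvStepB m (Nat.size m) a) (q, r)).2 < 2 ^ (Nat.size m - 1) := by
  intro k
  induction k with
  | zero =>
    intro q r hinv hr
    simpa using ⟨by simpa using hinv, hr⟩
  | succ k ih =>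
    intro q r hinv hr
    have hsm : 0 < Nat.size m := Nat.size_pos.mpr hm
    rw [List.range_succ, List.reverse_append]
    simp only [List.reverse_singleton, List.singleton_append, List.foldl_cons]
    set bit := (a >>> k) &&& 1 with hbit
    have hbitlt : bit < 2 := by
      rw [hbit, Nat.and_one_is_mod]
      omega
    set r1 := (r <<< 1) ||| bit with hr1
    have hr1val : r1 = 2 * r + bit := by rw [hr1, pv_or_bit r bit hbitlt]
    have hr1xor : r1 = (r <<< 1) ^^^ bit := by rw [hr1val, ← pv_xor_bit r bit hbitlt]
    -- streaming one bit: a >>> k = ((a >>> (k+1)) <<< 1) ^^^ bit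
    have hstream : a >>> k = ((a >>> (k+1)) <<< 1) ^^^ bit := by
      rw [show k + 1 = k + 1 from rfl, Nat.shiftRight_add, pv_xor_bit _ bit hbitlt]
      have h1 : (a >>> k) >>> 1 = (a >>> k) / 2 := by
        simp [Nat.shiftRight_succ, Nat.shiftRight_zero]
      rw [h1, hbit, Nat.and_one_is_mod]
      omega
    have hr1lt : r1 < 2 ^ Nat.size m := by
      have : (2:Nat) ^ Nat.size m = 2 * 2 ^ (Nat.size m - 1) := by
        rw [← pow_succ']
        congr 1
        omega
      omega
    -- the combined invariant value after shifting in the bit, for either branch's state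
    have hcomb : ∀ t : Nat, pvClmul m ((q <<< 1) ^^^ t) ^^^ (r1 ^^^ pvClmul m t) = a >>> k := by
      intro t
      rw [pvClmul_xor, pvClmul_shift, hr1xor]
      rw [hstream]
      have hshift : (pvClmul m q) <<< 1 ^^^ (r <<< 1) = (pvClmul m q ^^^ r) <<< 1 :=
        (Nat.shiftLeft_xor_distrib).symm
      calc (pvClmul m q) <<< 1 ^^^ pvClmul m t ^^^ ((r <<< 1) ^^^ bit ^^^ pvClmul m t)
          = ((pvClmul m q) <<< 1 ^^^ (r <<< 1)) ^^^ bit := by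
            simp [Nat.xor_assoc, Nat.xor_comm, Nat.xor_left_comm]
      _ = (pvClmul m q ^^^ r) <<< 1 ^^^ bit := by rw [hshift]
      _ = ((a >>> (k+1)) <<< 1) ^^^ bit := by rw [hinv]
    unfold pvStepB
    simp only []
    by_cases hcond : Nat.size ((r <<< 1) ||| ((a >>> k) &&& 1)) = Nat.size m
    · rw [if_pos hcond]
      -- reduction branch: register filled, xor off m; its top bit clears
      have hge1 : 2 ^ (Nat.size m - 1) ≤ r1 := Nat.lt_size.mp (by rw [← hr1] at hcond; omega)
      have hbtop : r1.testBit (Nat.size m - 1) = true :=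
        Nat.testBit_of_two_pow_le_and_two_pow_add_one_gt hge1 (by
          calc r1 < 2 ^ Nat.size m := hr1lt
          _ ≤ 2 ^ (Nat.size m - 1 + 1) := Nat.pow_le_pow_right (by norm_num) (by omega))
      have hbm : m.testBit (Nat.size m - 1) = true := pv_sizeMsb hm
      have hb2 : (r1 ^^^ m).testBit (Nat.size m - 1) = false := by
        rw [Nat.testBit_xor, hbtop, hbm]
        rfl
      have hlt2 : r1 ^^^ m < 2 ^ (Nat.size m - 1) := by
        apply pv_lt_of_testBit_false _ hb2
        have := Nat.xor_lt_two_pow hr1lt (Nat.lt_size_self m)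
        calc r1 ^^^ m < 2 ^ Nat.size m := this
        _ ≤ 2 ^ (Nat.size m - 1 + 1) := Nat.pow_le_pow_right (by norm_num) (by omega)
      have hq1 : (q <<< 1) ||| 1 = (q <<< 1) ^^^ 1 := by
        rw [pv_or_bit q 1 (by norm_num), pv_xor_bit q 1 (by norm_num)]
      have hinv' : pvClmul m ((q <<< 1) ||| 1) ^^^ (r1 ^^^ m) = a >>> k := by
        rw [hq1]
        have := hcomb 1
        rwa [pvClmul_one] at this
      exact ih ((q <<< 1) ||| 1) (r1 ^^^ m) hinv' hlt2
    · rw [if_neg hcond]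
      have hle : Nat.size r1 ≤ Nat.size m := Nat.size_le.mpr hr1lt
      have hlt1 : r1 < 2 ^ (Nat.size m - 1) := by
        have hne : Nat.size r1 ≠ Nat.size m := by rw [← hr1] at hcond; exact hcond
        calc r1 < 2 ^ Nat.size r1 := Nat.lt_size_self r1
        _ ≤ 2 ^ (Nat.size m - 1) := Nat.pow_le_pow_right (by norm_num) (by omega)
      have hinv' : pvClmul m (q <<< 1) ^^^ r1 = a >>> k := by
        have := hcomb 0
        simpa [pvClmul_zero] using this
      exact ih (q <<< 1) r1 hinv' hlt1

-- ===== VERDICT (by name: the statement is the Claim_ definition above) =====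
theorem euclid_division_spec : Claim_equal_euclid_division := by
  intro a b _ hpre
  obtain ⟨ha, hb⟩ := hpre
  unfold Spec_euclid_division euclid_division euclid_division_alt
  have hbne : b ≠ 0 := by omega
  rw [if_neg hbne, if_neg hbne]
  set n := a.toNat
  set m := b.toNat
  have hm : 0 < m := by simp only [m]; omega
  obtain ⟨hAinv, hAbound⟩ := pvLoopA_inv m hm (Nat.size n + 1) n 0 (by omega)
  have hBstart : pvClmul m 0 ^^^ 0 = n >>> Nat.size n := by
    rw [pvClmul_zero, Nat.shiftRight_eq_div_pow, Nat.div_eq_of_lt (Nat.lt_size_self n)]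
    simp
  obtain ⟨hBinv, hBbound⟩ := pvFoldB_inv m n hm (Nat.size n) 0 0 hBstart (by positivity)
  rw [pvClmul_zero, Nat.zero_xor] at hAinv
  have huniq := pv_unique hm hAbound hBbound (hAinv.trans hBinv.symm)
  simp only [huniq.1, huniq.2]
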